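-- pv_equiv track=rewrite | github.com/wanbiguizhao/leetcode | questionbank/2178. Maximum Split of Positive Even Integers.py | maximumEvenSplit
-- ===== SOURCE A (Python) =====
-- from typing import List
--
-- def maximumEvenSplit(finalSum: int) -> List[int]:
--     if finalSum%2==1:
--         return []
--     beg=0
--     ans=[0]
--     while  ans[-1] < finalSum:
--         beg+=2
--         ans.append(beg)
--         finalSum-=beg
--     ans[-1]+=finalSum
--     return ans[1:]
-- ===== SOURCE B (Python) =====
-- from typing import List
--
-- def maximumEvenSplit(finalSum: int) -> List[int]:
--     if finalSum % 2 == 1: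
--         return []
--     # k = largest k with k*(k+1) <= finalSum, found by binary search
--     lo, hi = 0, max(finalSum, 0)
--     while lo < hi:
--         mid = (lo + hi + 1) // 2
--         if mid * (mid + 1) <= finalSum:
--             lo = mid
--         else:
--             hi = mid - 1
--     k = lo
--     lst = [2 * i for i in range(1, k + 1)]
--     if lst:
--         lst[-1] += finalSum - k * (k + 1)
--     return lst
-- ===== Notes on version B (the rewrite author's own statement) =====
-- stated objective: alternative
-- what changed: Replaces A's subtract-until-exhausted greedy loop (append 2,4,6,... while the remainder allows) by a binary search for the term count k (largest k with k*(k+1) <= finalSum), then builds [2,4,...,2k] directly and adds the leftover to the last element.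
import Mathlib
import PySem

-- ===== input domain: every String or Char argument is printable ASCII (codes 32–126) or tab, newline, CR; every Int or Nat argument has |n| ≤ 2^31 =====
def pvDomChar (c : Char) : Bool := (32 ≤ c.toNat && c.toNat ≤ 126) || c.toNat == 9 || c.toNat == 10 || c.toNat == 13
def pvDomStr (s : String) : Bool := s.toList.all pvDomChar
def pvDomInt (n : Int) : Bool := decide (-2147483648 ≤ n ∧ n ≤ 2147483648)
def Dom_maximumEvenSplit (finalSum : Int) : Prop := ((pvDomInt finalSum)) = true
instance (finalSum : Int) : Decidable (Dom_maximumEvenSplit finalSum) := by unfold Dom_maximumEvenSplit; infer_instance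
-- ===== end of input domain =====

-- B replaces A's subtract-until-exhausted greedy loop by a binary search for the
-- term count k (the largest k with k*(k+1) ≤ finalSum) and builds the answer list
-- directly from it (objective: alternative algorithm, same return value).

-- ===== PORT A =====
-- A's while loop; fuel = finalSum.toNat + 1 is always sufficient (the loop runs at
-- most finalSum iterations); 'ans[-1]' is pyGet? ans (-1)
def pvLoopA (fuel : Nat) (ans : List Int) (beg finalSum : Int) : List Int :=
  match fuel with
  | 0 => []  -- never reached for the call maximumEvenSplit makes
  | f + 1 =>
    match PySem.List.pyGet? ans (-1) with
    | none => []  -- never reached: ans is nonempty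
    | some last =>
      if last < finalSum then
        pvLoopA f (ans ++ [beg + 2]) (beg + 2) (finalSum - (beg + 2))
      else
        -- ans[-1] += finalSum; return ans[1:]
        PySem.List.slice (ans.dropLast ++ [last + finalSum]) (some 1) none

def maximumEvenSplit (finalSum : Int) : List Int :=
  if PySem.Int.mod finalSum 2 = 1 then []
  else pvLoopA (finalSum.toNat + 1) [0] 0 finalSum

-- ===== PORT B =====
-- Source B's binary-search loop: largest k in [lo, hi] with k*(k+1) ≤ s
def pvBSearch (s lo hi : Int) : Int :=
  if h : lo < hi then
    let mid := PySem.Int.floordiv (lo + hi + 1) 2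
    if mid * (mid + 1) ≤ s then pvBSearch s mid hi else pvBSearch s lo (mid - 1)
  else lo
termination_by (hi - lo).toNat
decreasing_by
  all_goals
    simp only [PySem.Int.floordiv_eq_ediv_of_pos (by omega : (0:Int) < 2)] at *
    omega

-- Source B's "if lst: lst[-1] += d"
def pvAddToLast (lst : List Int) (d : Int) : List Int :=
  match lst.getLast? with
  | none => lst
  | some last => lst.dropLast ++ [last + d]

def maximumEvenSplit_alt (finalSum : Int) : List Int :=
  if PySem.Int.mod finalSum 2 = 1 then []
  else
    pvAddToLast
      ((PySem.List.pyRange 1 (pvBSearch finalSum 0 (max finalSum 0) + 1) 1).map (fun i => 2 * i))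
      (finalSum - pvBSearch finalSum 0 (max finalSum 0) * (pvBSearch finalSum 0 (max finalSum 0) + 1))

-- ===== PRECONDITION & SPEC =====
def Spec_maximumEvenSplit (finalSum : Int) (out : List Int) : Prop := out = maximumEvenSplit_alt finalSum
instance (finalSum : Int) (out : List Int) : Decidable (Spec_maximumEvenSplit finalSum out) := by unfold Spec_maximumEvenSplit; infer_instance

-- ===== CLAIM (what is proved, stated in full; the proofs are below) =====
def Claim_equal_maximumEvenSplit : Prop := ∀ (finalSum : Int), Dom_maximumEvenSplit finalSum → Spec_maximumEvenSplit finalSum (maximumEvenSplit finalSum)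

-- ===== LEMMAS AND PROOFS =====

-- the list A's loop has built after i iterations: [0, 2, 4, …, 2*i]
def pvAnsOf : Nat → List Int
  | 0 => [0]
  | i + 1 => pvAnsOf i ++ [2 * ((i : Int) + 1)]

-- its tail [2, 4, …, 2*i]
def pvEvens (i : Nat) : List Int := (List.range i).map (fun j => 2 * ((j : Int) + 1))

lemma pvEvens_succ (i : Nat) : pvEvens (i + 1) = pvEvens i ++ [2 * ((i : Int) + 1)] := by
  simp [pvEvens, List.range_succ]

lemma pvAnsOf_eq (i : Nat) : pvAnsOf i = 0 :: pvEvens i := by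
  induction i with
  | zero => simp [pvAnsOf, pvEvens]
  | succ n ih => simp [pvAnsOf, pvEvens_succ, ih]

lemma pvAnsOf_last (i : Nat) : PySem.List.pyGet? (pvAnsOf i) (-1) = some (2 * (i : Int)) := by
  cases i with
  | zero => simp [pvAnsOf, PySem.List.pyGet?_neg_one]
  | succ n => simp [pvAnsOf, PySem.List.pyGet?_neg_one_append_singleton]

lemma pvLoopA_run (s : Int) (hdvd : 2 ∣ s) (k : Nat)
    (hk1 : (k : Int) * ((k : Int) + 1) ≤ s) (hk2 : s < ((k : Int) + 1) * ((k : Int) + 2)) :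
    ∀ (fuel i : Nat), i ≤ k → k - i < fuel →
      pvLoopA fuel (pvAnsOf i) (2 * (i : Int)) (s - (i : Int) * ((i : Int) + 1))
        = PySem.List.slice ((pvAnsOf k).dropLast ++ [2 * (k : Int) + (s - (k : Int) * ((k : Int) + 1))]) (some 1) none := by
  intro fuel
  induction fuel with
  | zero => intro i _ h; omega
  | succ f ih =>
    intro i hik _
    rw [pvLoopA.eq_def]
    simp only [pvAnsOf_last i]
    by_cases heq : i = k
    · subst heq
      have hcond : ¬ (2 * (i : Int) < s - (i : Int) * ((i : Int) + 1)) := by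
        intro hlt
        have h2 : (2 : Int) ∣ (i : Int) * ((i : Int) + 1) := (Int.even_mul_succ_self (i : Int)).two_dvd
        have hexp : ((i : Int) + 1) * ((i : Int) + 2) = (i : Int) * ((i : Int) + 1) + 2 * (i : Int) + 2 := by ring
        obtain ⟨a, ha⟩ := hdvd
        obtain ⟨b, hb⟩ := h2
        rw [ha, hb] at hlt
        rw [ha, hexp, hb] at hk2
        omega
      rw [if_neg hcond]
    · have hlt : i < k := lt_of_le_of_ne hik heq
      have hbi : ((i : Int) + 1) ≤ (k : Int) := by exact_mod_cast hlt
      have h0 : (0 : Int) ≤ (i : Int) := by positivity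
      have hcond : 2 * (i : Int) < s - (i : Int) * ((i : Int) + 1) := by nlinarith
      rw [if_pos hcond]
      have h1 : pvAnsOf (i + 1) = pvAnsOf i ++ [2 * (i : Int) + 2] := by
        have he : 2 * ((i : Int) + 1) = 2 * (i : Int) + 2 := by ring
        rw [pvAnsOf, he]
      rw [← h1,
          show (2 * (i : Int) + 2) = 2 * (((i + 1 : Nat) : Int)) by push_cast; ring]
      rw [show s - (i : Int) * ((i : Int) + 1) - 2 * (((i + 1 : Nat) : Int))
            = s - ((i + 1 : Nat) : Int) * (((i + 1 : Nat) : Int) + 1) by push_cast; ring]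
      exact ih (i + 1) (by omega) (by omega)

lemma pvBSearch_spec (s : Int) : ∀ (lo hi : Int), lo ≤ hi → lo * (lo + 1) ≤ s →
    s < (hi + 1) * (hi + 2) →
    lo ≤ pvBSearch s lo hi ∧ pvBSearch s lo hi * (pvBSearch s lo hi + 1) ≤ s ∧
      s < (pvBSearch s lo hi + 1) * (pvBSearch s lo hi + 2) := by
  intro lo hi
  induction lo, hi using pvBSearch.induct s with
  | case1 lo hi h mid hle ih =>
    intro _ _ hhi
    rw [pvBSearch, dif_pos h, if_pos]
    · have hm : lo < mid ∧ mid ≤ hi := by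
        simp only [mid, PySem.Int.floordiv_eq_ediv_of_pos (by omega : (0:Int) < 2)]
        omega
      have := ih hm.2 hle hhi
      exact ⟨le_trans (le_of_lt hm.1) this.1, this.2⟩
    · exact hle
  | case2 lo hi h mid hgt ih =>
    intro _ hlo _
    rw [pvBSearch, dif_pos h, if_neg hgt]
    have hm : lo < mid ∧ mid ≤ hi := by
      simp only [mid, PySem.Int.floordiv_eq_ediv_of_pos (by omega : (0:Int) < 2)]
      omega
    refine ih (by omega) hlo ?_
    have he : (mid - 1 + 1) * (mid - 1 + 2) = mid * (mid + 1) := by ring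
    rw [he]
    omega
  | case3 lo hi h =>
    intro hle hlo hhi
    rw [pvBSearch, dif_neg h]
    have : lo = hi := le_antisymm hle (by omega)
    subst this
    exact ⟨le_refl _, hlo, hhi⟩

lemma pvEvens_eq_pyRange (k : Nat) :
    (PySem.List.pyRange 1 ((k : Int) + 1) 1).map (fun i => 2 * i) = pvEvens k := by
  induction k with
  | zero =>
    rw [show ((0 : Nat) : Int) + 1 = 0 + 1 by norm_num,
        PySem.List.pyRange_one_eq_nil (by omega)]
    simp [pvEvens]
  | succ n ih =>
    rw [show ((n + 1 : Nat) : Int) + 1 = ((n : Int) + 1) + 1 by push_cast; ring,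
        PySem.List.pyRange_one_succ_right (by omega), List.map_append, ih, pvEvens_succ]
    simp

-- ===== VERDICT (by name: the statement is the Claim_ definition above) =====
theorem maximumEvenSplit_spec : Claim_equal_maximumEvenSplit := by
  intro s _
  unfold Spec_maximumEvenSplit maximumEvenSplit maximumEvenSplit_alt
  by_cases hodd : PySem.Int.mod s 2 = 1
  · rw [if_pos hodd, if_pos hodd]
  · rw [if_neg hodd, if_neg hodd]
    have hdvd : (2 : Int) ∣ s := by
      have h1 := PySem.Int.mod_nonneg s (by omega : (0:Int) < 2)
      have h2 := PySem.Int.mod_lt s (by omega : (0:Int) < 2)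
      have h0 : PySem.Int.mod s 2 = 0 := by omega
      exact (PySem.Int.mod_eq_zero_iff_dvd s 2).mp h0
    by_cases hneg : s < 0
    · -- negative even input: both sides return []
      have hmax : max s 0 = 0 := by omega
      have hfuel : s.toNat + 1 = 1 := by omega
      have hb0 : pvBSearch s 0 0 = 0 := by rw [pvBSearch]; simp
      have hns : ¬ ((0:Int) < s) := by omega
      rw [hfuel, hmax, hb0, pvLoopA]
      have hg : PySem.List.pyGet? [(0:Int)] (-1) = some 0 := by
        rw [PySem.List.pyGet?_neg_one]; rfl
      rw [hg]
      simp only [if_neg hns]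
      rw [PySem.List.pyRange_one_eq_nil (by omega : (0:Int) + 1 ≤ 1)]
      simp [pvAddToLast, PySem.List.slice_from_one]
    · push_neg at hneg
      have hmax : max s 0 = s := by omega
      rw [hmax]
      obtain ⟨hk0, hkle, hklt⟩ := pvBSearch_spec s 0 s hneg (by linarith) (by nlinarith)
      set k' := pvBSearch s 0 s with hk'
      set k : Nat := k'.toNat with hkdef
      have hcast : (k : Int) = k' := Int.toNat_of_nonneg hk0
      have hkle' : (k : Int) * ((k : Int) + 1) ≤ s := by rw [hcast]; exact hkle
      have hklt' : s < ((k : Int) + 1) * ((k : Int) + 2) := by rw [hcast]; exact hklt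
      have hks : (k : Int) ≤ s := by nlinarith [hkle', Nat.cast_nonneg (α := Int) k]
      have hkns : k ≤ s.toNat := by omega
      have hrun := pvLoopA_run s hdvd k hkle' hklt' (s.toNat + 1) 0 (by omega) (by omega)
      simp only [Nat.cast_zero, mul_zero, zero_add, mul_one, sub_zero] at hrun
      have h00 : pvAnsOf 0 = [0] := rfl
      rw [h00] at hrun
      rw [hrun, ← hcast, pvEvens_eq_pyRange k]
      cases hk : k with
      | zero =>
        simp [pvEvens, pvAnsOf, pvAddToLast, PySem.List.slice_from_one]
      | succ n =>
        have hlast : (pvEvens (n + 1)).getLast? = some (2 * ((n : Int) + 1)) := by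
          rw [pvEvens_succ]; simp
        have hdrop : (pvEvens (n + 1)).dropLast = pvEvens n := by
          rw [pvEvens_succ]; exact List.dropLast_concat ..
        unfold pvAddToLast
        rw [hlast, hdrop, pvAnsOf_eq, pvEvens_succ,
            show ((0:Int) :: (pvEvens n ++ [2 * ((n:Int) + 1)])) = ((0:Int) :: pvEvens n) ++ [2 * ((n:Int) + 1)] by simp,
            List.dropLast_concat, PySem.List.slice_from_one]
        simp only [List.cons_append, List.tail_cons]
        congr 3
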